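-- pv_equiv track=rewrite | github.com/xingchen-026/agent_project | multimodal-tiny/src/cn_data.py | video_caption_zh
-- ===== SOURCE A (Python) =====
-- SHAPE_ZH = {
--     'circle': '圆形', 'square': '正方形', 'triangle': '三角形',
--     'star': '星形', 'heart': '心形', 'diamond': '菱形',
-- }
--
-- COLOR_ZH = {
--     'red': '红色', 'green': '绿色', 'blue': '蓝色',
--     'yellow': '黄色', 'purple': '紫色', 'orange': '橙色',
--     'cyan': '青色', 'pink': '粉色', 'white': '白色',
--     'black': '黑色', 'gray': '灰色', 'navy': '深蓝',
--     'dark gray': '深灰', 'dark green': '深绿',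
-- }
--
-- BG_ZH = {
--     'black': '黑色', 'dark gray': '深灰色', 'navy': '深蓝色',
--     'dark green': '深绿色',
-- }
--
-- DIR_ZH = {
--     'left to right': '从左到右',
--     'right to left': '从右到左',
--     'top to bottom': '从上到下',
--     'bottom to top': '从下到上',
--     'diagonal': '对角线',
-- }
--
-- def video_caption_zh(caption_en):
--     """Translate English video caption to Chinese."""
--     # Template: "A [color] [shape] moving [direction] on a [bg] background."
--     words = caption_en.lower().replace('.', '').split()
--
--     found_colors = [w for w in words if w in COLOR_ZH]
--     found_shapes = [w for w in words if w in SHAPE_ZH]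
--     found_bg = next((w for w in words if w in BG_ZH), 'black')
--     found_dir = next((d for d in DIR_ZH if d in caption_en.lower()), 'left to right')
--
--     c = COLOR_ZH.get(found_colors[0], '红色') if found_colors else '红色'
--     s = SHAPE_ZH.get(found_shapes[0], '圆形') if found_shapes else '圆形'
--     bg = BG_ZH.get(found_bg, '黑色')
--     d = DIR_ZH.get(found_dir, '从左到右')
--
--     return f"一个{c}{s}在{bg}背景上{d}移动"
-- ===== SOURCE B (Python) =====
-- SHAPE_ZH = {
--     'circle': '圆形', 'square': '正方形', 'triangle': '三角形',
--     'star': '星形', 'heart': '心形', 'diamond': '菱形',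
-- }
--
-- COLOR_ZH = {
--     'red': '红色', 'green': '绿色', 'blue': '蓝色',
--     'yellow': '黄色', 'purple': '紫色', 'orange': '橙色',
--     'cyan': '青色', 'pink': '粉色', 'white': '白色',
--     'black': '黑色', 'gray': '灰色', 'navy': '深蓝',
--     'dark gray': '深灰', 'dark green': '深绿',
-- }
--
-- BG_ZH = {
--     'black': '黑色', 'dark gray': '深灰色', 'navy': '深蓝色',
--     'dark green': '深绿色',
-- }
--
-- DIR_ZH = {
--     'left to right': '从左到右',
--     'right to left': '从右到左',
--     'top to bottom': '从上到下',
--     'bottom to top': '从下到上',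
--     'diagonal': '对角线',
-- }
--
--
-- def _earliest(words, table, default_zh):
--     """Inverted lookup: scan the TABLE, locate each key's first position in the
--     word list, and keep the translation of the key occurring earliest."""
--     best_pos = None
--     best_zh = default_zh
--     for key, zh in table.items():
--         if key in words:
--             pos = words.index(key)
--             if best_pos is None or pos < best_pos:
--                 best_pos, best_zh = pos, zh
--     return best_zh
--
--
-- def video_caption_zh(caption_en):
--     """Translate English video caption to Chinese (table-driven position lookup)."""
--     low = caption_en.lower()
--     words = low.replace('.', '').split()
--
--     c = _earliest(words, COLOR_ZH, '红色')
--     s = _earliest(words, SHAPE_ZH, '圆形')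
--     bg = _earliest(words, BG_ZH, '黑色')
--
--     d = '从左到右'
--     for key, zh in DIR_ZH.items():
--         if key in low:
--             d = zh
--             break
--
--     return f"一个{c}{s}在{bg}背景上{d}移动"
-- ===== Notes on version B (the rewrite author's own statement) =====
-- stated objective: alternative
-- what changed: B inverts the traversal: instead of A's scans over the word list filtered through the dictionaries, B iterates over each translation TABLE, locates every key's first position in the word list with list.index, and keeps the translation whose key occurs earliest (min-position wins), which provably reproduces A's first-matching-word semantics; the direction stays a key-order substring scan.
import Mathlib
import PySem

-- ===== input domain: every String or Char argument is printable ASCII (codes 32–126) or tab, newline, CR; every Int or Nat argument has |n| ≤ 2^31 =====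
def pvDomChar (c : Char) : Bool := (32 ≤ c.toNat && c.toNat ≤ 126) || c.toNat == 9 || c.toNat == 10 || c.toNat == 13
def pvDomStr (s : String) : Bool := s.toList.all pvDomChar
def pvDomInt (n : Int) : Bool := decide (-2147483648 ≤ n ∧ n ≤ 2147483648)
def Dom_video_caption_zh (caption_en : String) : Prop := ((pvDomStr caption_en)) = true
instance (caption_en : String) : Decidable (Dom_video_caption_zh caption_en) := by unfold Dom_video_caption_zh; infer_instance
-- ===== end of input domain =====

-- B inverts the traversal: it scans the translation tables, locating each key's first position in
-- the word list, and keeps the earliest-occurring key's translation (objective: alternative; same result).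

def SHAPE_ZH : PySem.Dict String String := PySem.Dict.mk
  [("circle", "圆形"), ("square", "正方形"), ("triangle", "三角形"),
   ("star", "星形"), ("heart", "心形"), ("diamond", "菱形")]

def COLOR_ZH : PySem.Dict String String := PySem.Dict.mk
  [("red", "红色"), ("green", "绿色"), ("blue", "蓝色"),
   ("yellow", "黄色"), ("purple", "紫色"), ("orange", "橙色"),
   ("cyan", "青色"), ("pink", "粉色"), ("white", "白色"),
   ("black", "黑色"), ("gray", "灰色"), ("navy", "深蓝"),
   ("dark gray", "深灰"), ("dark green", "深绿")]

def BG_ZH : PySem.Dict String String := PySem.Dict.mk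
  [("black", "黑色"), ("dark gray", "深灰色"), ("navy", "深蓝色"),
   ("dark green", "深绿色")]

def DIR_ZH : PySem.Dict String String := PySem.Dict.mk
  [("left to right", "从左到右"), ("right to left", "从右到左"),
   ("top to bottom", "从上到下"), ("bottom to top", "从下到上"),
   ("diagonal", "对角线")]

-- ===== PORT A =====
def video_caption_zh (caption_en : String) : String :=
  let low := PySem.Str.lower caption_en
  let words := PySem.Str.split₀ (PySem.Str.replace low "." "")
  let found_colors := words.filter (fun w => COLOR_ZH.contains w)
  let found_shapes := words.filter (fun w => SHAPE_ZH.contains w)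
  let found_bg := (words.find? (fun w => BG_ZH.contains w)).getD "black"
  let found_dir := ((DIR_ZH.keys).find? (fun d => PySem.Str.isIn d low)).getD "left to right"
  let c := match found_colors with
    | [] => "红色"
    | w :: _ => COLOR_ZH.getD w "红色"
  let s := match found_shapes with
    | [] => "圆形"
    | w :: _ => SHAPE_ZH.getD w "圆形"
  let bg := BG_ZH.getD found_bg "黑色"
  let d := DIR_ZH.getD found_dir "从左到右"
  "一个" ++ c ++ s ++ "在" ++ bg ++ "背景上" ++ d ++ "移动"

-- ===== PORT B =====
-- one iteration of B's table loop: 'if key in words: pos = words.index(key); keep if earlier'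
-- ('key in words' + 'words.index(key)' is exactly the some-case of PySem.List.index?)
def earliestStep (words : List String) (st : Option Nat × String) (kv : String × String) :
    Option Nat × String :=
  match PySem.List.index? words kv.1 with
  | none => st
  | some pos =>
    match st.1 with
    | none => (some pos, kv.2)
    | some best => if pos < best then (some pos, kv.2) else st

-- B's _earliest: scan the TABLE, keep the translation of the key occurring earliest in words
def earliest (words : List String) (items : List (String × String)) (default_zh : String) : String :=
  (items.foldl (earliestStep words) (none, default_zh)).2

-- B's direction loop with break ('for key, zh in DIR_ZH.items(): if key in low: d = zh; break')
def dirLoop : List (String × String) → String → String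
  | [], _ => "从左到右"
  | (k, v) :: rest, low => if PySem.Str.isIn k low then v else dirLoop rest low

def video_caption_zh_alt (caption_en : String) : String :=
  let low := PySem.Str.lower caption_en
  let words := PySem.Str.split₀ (PySem.Str.replace low "." "")
  let c := earliest words COLOR_ZH.items "红色"
  let s := earliest words SHAPE_ZH.items "圆形"
  let bg := earliest words BG_ZH.items "黑色"
  let d := dirLoop DIR_ZH.items low
  "一个" ++ c ++ s ++ "在" ++ bg ++ "背景上" ++ d ++ "移动"

-- ===== PRECONDITION & SPEC =====
def Spec_video_caption_zh (caption_en : String) (out : String) : Prop := out = video_caption_zh_alt caption_en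
instance (caption_en : String) (out : String) : Decidable (Spec_video_caption_zh caption_en out) := by unfold Spec_video_caption_zh; infer_instance

-- ===== CLAIM (what is proved, stated in full; the proofs are below) =====
def Claim_equal_video_caption_zh : Prop := ∀ (caption_en : String), Dom_video_caption_zh caption_en → Spec_video_caption_zh caption_en (video_caption_zh caption_en)

-- ===== LEMMAS AND PROOFS =====

-- a dict's membership test is the table scan B performs
theorem contains_eq_any (d : PySem.Dict String String) (w : String) :
    d.contains w = d.items.any (fun kv => kv.1 == w) := rfl

-- a dict lookup is the first matching item of the table
theorem get?_eq_find? (d : PySem.Dict String String) (w : String) :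
    d.get? w = (d.items.find? (fun kv => kv.1 == w)).map Prod.snd := rfl

-- on an empty word list B's fold never moves
theorem foldl_nil_words (its : List (String × String)) :
    ∀ (st : Option Nat × String), its.foldl (earliestStep []) st = st := by
  induction its with
  | nil => intro st; rfl
  | cons kv rest ih =>
    intro st
    have h : PySem.List.index? ([] : List String) kv.1 = none :=
      (PySem.List.index?_eq_none_iff [] kv.1).mpr (by simp)
    simp only [List.foldl_cons, earliestStep, h]
    exact ih st

-- if w is not a key of its, dropping the head word only shifts every recorded position by one
theorem foldl_shift (w : String) (ws : List String) :
    ∀ (its : List (String × String)), (∀ kv ∈ its, kv.1 ≠ w) →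
    ∀ (i? : Option Nat) (d : String),
    its.foldl (earliestStep (w :: ws)) (i?.map (· + 1), d)
      = ((its.foldl (earliestStep ws) (i?, d)).1.map (· + 1),
         (its.foldl (earliestStep ws) (i?, d)).2) := by
  intro its
  induction its with
  | nil => intro _ i? d; rfl
  | cons kv rest ih =>
    intro h i? d
    have hne : w ≠ kv.1 := Ne.symm (h kv (by simp))
    have hrest : ∀ kv' ∈ rest, kv'.1 ≠ w := fun kv' hm => h kv' (by simp [hm])
    cases hidx : PySem.List.index? ws kv.1 with
    | none =>
      have hstep : PySem.List.index? (w :: ws) kv.1 = none := by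
        rw [PySem.List.index?_cons_of_ne ws hne, hidx]; rfl
      simp only [List.foldl_cons, earliestStep, hstep, hidx]
      exact ih hrest i? d
    | some i =>
      have hstep : PySem.List.index? (w :: ws) kv.1 = some (i + 1) := by
        rw [PySem.List.index?_cons_of_ne ws hne, hidx]; rfl
      cases i? with
      | none =>
        simpa only [List.foldl_cons, earliestStep, hstep, hidx, Option.map_none] using
          ih hrest (some i) kv.2
      | some bi =>
        by_cases hlt : i < bi
        · have hlt1 : i + 1 < bi + 1 := by omega
          simpa only [List.foldl_cons, earliestStep, hstep, hidx, Option.map_some,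
            if_pos hlt1, if_pos hlt] using ih hrest (some i) kv.2
        · have hlt1 : ¬ (i + 1 < bi + 1) := by omega
          simpa only [List.foldl_cons, earliestStep, hstep, hidx, Option.map_some,
            if_neg hlt1, if_neg hlt] using ih hrest (some bi) d

-- once the best position is 0 nothing can beat it
theorem foldl_zero (w : String) (ws : List String) (v : String) :
    ∀ (post : List (String × String)),
    post.foldl (earliestStep (w :: ws)) (some 0, v) = (some 0, v) := by
  intro post
  induction post with
  | nil => rfl
  | cons kv rest ih =>
    cases hidx : PySem.List.index? (w :: ws) kv.1 with
    | none => simp only [List.foldl_cons, earliestStep, hidx]; exact ih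
    | some i =>
      simp only [List.foldl_cons, earliestStep, hidx, if_neg (Nat.not_lt_zero i)]
      exact ih

-- B's table-inverted scan computes A's first-matching-word lookup
theorem earliest_eq_find (its : List (String × String)) (dflt : String) :
    ∀ (words : List String),
    earliest words its dflt
      = match words.find? (fun w => its.any (fun kv => kv.1 == w)) with
        | none => dflt
        | some w => ((its.find? (fun kv => kv.1 == w)).map Prod.snd).getD dflt := by
  intro words
  induction words with
  | nil =>
    unfold earliest
    rw [foldl_nil_words its (none, dflt)]
    rfl
  | cons w ws ih =>
    by_cases h : its.any (fun kv => kv.1 == w) = true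
    · -- w is a key: the fold locks onto position 0 at the first item keyed w
      obtain ⟨kv0, hfind⟩ : ∃ kv0, its.find? (fun kv => kv.1 == w) = some kv0 := by
        have : (its.find? (fun kv => kv.1 == w)).isSome := by
          rw [List.find?_isSome]
          simpa [List.any_eq_true] using h
        exact Option.isSome_iff_exists.mp this
      obtain ⟨hkv0, pre, post, hsplit, hpre⟩ := List.find?_eq_some_iff_append.mp hfind
      have hkey : kv0.1 = w := by simpa using hkv0
      have hpre' : ∀ kv ∈ pre, kv.1 ≠ w := by
        intro kv hm
        have := hpre kv hm
        simpa using this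
      have hsum : earliest (w :: ws) its dflt = kv0.2 := by
        unfold earliest
        rw [hsplit, List.foldl_append, List.foldl_cons]
        have hshift := foldl_shift w ws pre hpre' none dflt
        simp only [Option.map_none] at hshift
        rw [hshift]
        have hstep : earliestStep (w :: ws)
            ((List.foldl (earliestStep ws) (none, dflt) pre).1.map (· + 1),
             (List.foldl (earliestStep ws) (none, dflt) pre).2) kv0 = (some 0, kv0.2) := by
          have hidx : PySem.List.index? (w :: ws) kv0.1 = some 0 := by
            rw [hkey]; exact PySem.List.index?_cons_self w ws
          cases hr : (List.foldl (earliestStep ws) (none, dflt) pre).1 with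
          | none => simp only [earliestStep, hidx, Option.map_none]
          | some j =>
            simp only [earliestStep, hidx, Option.map_some]
            rw [if_pos (Nat.zero_lt_succ j)]
        rw [hstep, foldl_zero]
      rw [hsum]
      have hwfind : (w :: ws).find? (fun w' => its.any (fun kv => kv.1 == w')) = some w := by
        simp [h]
      rw [hwfind]
      simp [hfind]
    · -- w is not a key: step over it and recurse
      have h' : ∀ kv ∈ its, kv.1 ≠ w := by
        intro kv hm heq
        exact h (List.any_eq_true.mpr ⟨kv, hm, by simp [heq]⟩)
      have hskip : earliest (w :: ws) its dflt = earliest ws its dflt := by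
        unfold earliest
        have := foldl_shift w ws its h' none dflt
        simp only [Option.map_none] at this
        rw [this]
      have hwfind : (w :: ws).find? (fun w' => its.any (fun kv => kv.1 == w'))
          = ws.find? (fun w' => its.any (fun kv => kv.1 == w')) := by
        simp [h]
      rw [hskip, hwfind, ih]

set_option maxRecDepth 4096 in
-- the direction scans agree: A's next() over the keys vs B's break-loop over the items
theorem dir_eq (low : String) :
    DIR_ZH.getD (((DIR_ZH.keys).find? (fun d => PySem.Str.isIn d low)).getD "left to right") "从左到右"
      = dirLoop DIR_ZH.items low := by
  cases h1 : PySem.Str.isIn "left to right" low <;>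
  cases h2 : PySem.Str.isIn "right to left" low <;>
  cases h3 : PySem.Str.isIn "top to bottom" low <;>
  cases h4 : PySem.Str.isIn "bottom to top" low <;>
  cases h5 : PySem.Str.isIn "diagonal" low <;>
  simp_all [DIR_ZH, dirLoop, List.find?, PySem.Dict.getD, PySem.Dict.get?, PySem.Dict.keys]

-- per-table corollary: B's earliest equals A's first-word-in-dict lookup with default
theorem earliest_eq_table (d : PySem.Dict String String) (dflt : String) (words : List String) :
    earliest words d.items dflt
      = match words.find? (fun w => d.contains w) with
        | none => dflt
        | some w => d.getD w dflt := by
  rw [earliest_eq_find d.items dflt words]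
  simp only [← contains_eq_any]
  cases hf : words.find? (fun w => d.contains w) with
  | none => rfl
  | some w => simp [PySem.Dict.getD_eq_get?_getD, get?_eq_find?]

theorem bg_black : BG_ZH.getD "black" "黑色" = "黑色" := by decide

-- ===== VERDICT (by name: the statement is the Claim_ definition above) =====
theorem video_caption_zh_spec : Claim_equal_video_caption_zh := by
  intro caption_en _
  show video_caption_zh caption_en = video_caption_zh_alt caption_en
  unfold video_caption_zh video_caption_zh_alt
  simp only [earliest_eq_table, ← dir_eq, ← List.head?_filter]
  cases hc : List.filter (fun w => COLOR_ZH.contains w)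
      (PySem.Str.split₀ (PySem.Str.replace (PySem.Str.lower caption_en) "." "")) <;>
  cases hs : List.filter (fun w => SHAPE_ZH.contains w)
      (PySem.Str.split₀ (PySem.Str.replace (PySem.Str.lower caption_en) "." "")) <;>
  cases hb : List.filter (fun w => BG_ZH.contains w)
      (PySem.Str.split₀ (PySem.Str.replace (PySem.Str.lower caption_en) "." "")) <;>
  (simp only [List.head?_cons, List.head?_nil, bg_black]; rfl)
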